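-- pv_equiv track=rewrite | github.com/wriml92/Python_Coding_Test | Solution65.py | solution
-- ===== SOURCE A (Python) =====
-- def solution(s):
--     cnt1 = 0
--     cnt2 = 0
--     answer = 0
--     k = ""
--     for i in s:
--         if cnt1 == cnt2:
--             cnt1 += 1
--             k = i
--             answer += 1
--         elif k == i:
--             cnt1 += 1
--         else:
--             cnt2 += 1
--     return answer
-- ===== SOURCE B (Python) =====
-- def solution(s):
--     def groups():
--         it = iter(s)
--         for c in it:
--             bal = 1
--             while bal != 0:
--                 nxt = next(it, None)
--                 if nxt is None:
--                     break
--                 bal += 1 if nxt == c else -1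
--             yield 1
--     return sum(groups())
-- ===== Notes on version B (the rewrite author's own statement) =====
-- stated objective: alternative
-- what changed: Replaces A's flat one-pass state machine (two never-reset match/mismatch counters plus a remembered leader string) by a generator over a shared character iterator: an outer for-loop takes each group's leader, a nested while-loop drains the iterator using one signed balance counter until it returns to zero, and sum() counts the yielded groups.
import Mathlib
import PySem

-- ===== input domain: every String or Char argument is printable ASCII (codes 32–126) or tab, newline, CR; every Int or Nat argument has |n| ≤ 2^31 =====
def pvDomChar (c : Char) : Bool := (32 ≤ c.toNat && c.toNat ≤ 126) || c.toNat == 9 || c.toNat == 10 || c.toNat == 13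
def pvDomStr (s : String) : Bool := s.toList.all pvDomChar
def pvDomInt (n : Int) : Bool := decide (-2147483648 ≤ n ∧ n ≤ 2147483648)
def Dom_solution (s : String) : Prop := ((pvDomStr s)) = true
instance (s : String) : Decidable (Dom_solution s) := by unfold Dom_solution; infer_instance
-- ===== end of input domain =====

-- B replaces A's flat two-counter state machine by a generator over a shared iterator:
-- per group, a nested while drains the iterator with one signed balance counter; sum()
-- counts the groups (objective: alternative decomposition; same cost).

-- ===== PORT A =====
-- state: (cnt1, cnt2, answer, k); k is a string ("" initially, then the 1-char leader)
def solutionStep (st : Int × Int × Int × String) (c : Char) : Int × Int × Int × String :=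
  if st.1 == st.2.1 then (st.1 + 1, st.2.1, st.2.2.1 + 1, String.ofList [c])
  else if st.2.2.2 == String.ofList [c] then (st.1 + 1, st.2.1, st.2.2.1, st.2.2.2)
  else (st.1, st.2.1 + 1, st.2.2.1, st.2.2.2)

def solution (s : String) : Int :=
  (s.toList.foldl solutionStep (0, 0, 0, "")).2.2.1

-- ===== PORT B =====
-- the iterator is the remaining character list; B's inner `while bal != 0` drains it
-- (next(it, None) is None = the list is empty → break) and returns what is left
def solInner (f : Char) (bal : Int) : List Char → List Char
  | [] => []
  | c :: rest =>
    if bal = 0 then c :: rest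
    else solInner f (bal + (if c == f then 1 else -1)) rest

-- B's outer `for c in it` with `yield 1` per group, and sum() over the generator:
-- each leader taken from the shared iterator contributes 1, then the inner while runs.
-- The Nat fuel only makes the recursion structural (the iterator shrinks each round,
-- so fuel = length never runs out); it adds no behaviour.
def solOuterF : Nat → List Char → Int
  | _, [] => 0
  | 0, _ :: _ => 0
  | fuel + 1, c :: rest => 1 + solOuterF fuel (solInner c 1 rest)

def solution_alt (s : String) : Int := solOuterF s.toList.length s.toList

-- ===== PRECONDITION & SPEC =====
def Spec_solution (s : String) (out : Int) : Prop := out = solution_alt s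
instance (s : String) (out : Int) : Decidable (Spec_solution s out) := by unfold Spec_solution; infer_instance

-- ===== CLAIM (what is proved, stated in full; the proofs are below) =====
def Claim_equal_solution : Prop := ∀ (s : String), Dom_solution s → Spec_solution s (solution s)

-- ===== LEMMAS AND PROOFS =====

theorem solInner_length (f : Char) : ∀ (l : List Char) (bal : Int),
    (solInner f bal l).length ≤ l.length := by
  intro l
  induction l with
  | nil => intro bal; simp [solInner]
  | cons c rest ih =>
    intro bal
    rw [solInner]
    split
    · simp
    · exact Nat.le_succ_of_le (ih _)

-- the fuel is irrelevant once it covers the list's length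
theorem solOuterF_irrel : ∀ (f1 : Nat) (l : List Char) (f2 : Nat),
    l.length ≤ f1 → l.length ≤ f2 → solOuterF f1 l = solOuterF f2 l := by
  intro f1
  induction f1 with
  | zero =>
    intro l f2 h1 _
    have : l = [] := List.length_eq_zero_iff.mp (Nat.le_zero.mp h1)
    subst this
    simp [solOuterF]
  | succ n ih =>
    intro l f2 h1 h2
    cases l with
    | nil => simp [solOuterF]
    | cons c rest =>
      cases f2 with
      | zero => simp at h2
      | succ m =>
        rw [solOuterF, solOuterF]
        have hr : (solInner c 1 rest).length ≤ rest.length := solInner_length c rest 1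
        have : solOuterF n (solInner c 1 rest) = solOuterF m (solInner c 1 rest) :=
          ih _ _ (le_trans hr (by simpa using h1)) (le_trans hr (by simpa using h2))
        rw [this]

-- proof-side view of B's outer loop: fuel = own length
def solOuter (l : List Char) : Int := solOuterF l.length l

theorem solOuterF_eq : ∀ (fuel : Nat) (l : List Char), l.length ≤ fuel →
    solOuterF fuel l = solOuter l := by
  intro fuel l h
  exact solOuterF_irrel fuel l l.length h le_rfl

theorem solInner_zero (f : Char) (l : List Char) : solInner f 0 l = l := by
  cases l with
  | nil => rfl
  | cons c rest => rw [solInner]; simp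

theorem solOuter_cons (c : Char) (rest : List Char) :
    solOuter (c :: rest) = 1 + solOuter (solInner c 1 rest) := by
  unfold solOuter
  rw [List.length_cons, solOuterF]
  rw [solOuterF_irrel rest.length (solInner c 1 rest) (solInner c 1 rest).length
    (solInner_length c rest 1) le_rfl]

-- Joint invariant, strong induction on length: (1) from an unbalanced state whose
-- counter difference equals B's balance, A's fold computes B's answer for the rest of
-- the current group plus the later groups; (2) from a balanced state A's fold computes
-- solOuter of the remaining characters.
theorem fold_lemma : ∀ (n : Nat) (l : List Char), l.length ≤ n →
    (∀ (a1 a2 ans : Int) (f : Char), a1 ≠ a2 →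
      (l.foldl solutionStep (a1, a2, ans, String.ofList [f])).2.2.1
        = ans + solOuter (solInner f (a1 - a2) l))
    ∧ (∀ (a ans : Int) (k : String),
      (l.foldl solutionStep (a, a, ans, k)).2.2.1 = ans + solOuter l) := by
  intro n
  induction n with
  | zero =>
    intro l hl
    have : l = [] := List.length_eq_zero_iff.mp (Nat.le_zero.mp hl)
    subst this
    constructor
    · intro a1 a2 ans f _; simp [solInner, solOuter, solOuterF]
    · intro a ans k; simp [solOuter, solOuterF]
  | succ n ih =>
    intro l hl
    constructor
    · intro a1 a2 ans f hne
      cases l with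
      | nil => simp [solInner, solOuter, solOuterF]
      | cons c rest =>
        have hrest : rest.length ≤ n := by
          simpa using Nat.lt_succ_iff.mp (Nat.lt_of_lt_of_le (by simp) hl)
        have hab : (a1 == a2) = false := by simp [hne]
        have hbal : ¬ (a1 - a2 = 0) := by omega
        rw [solInner, if_neg hbal]
        by_cases hc : c = f
        · subst hc
          have hk : (String.ofList [c] == String.ofList [c]) = true := by simp
          simp only [List.foldl_cons, solutionStep, hab, Bool.false_eq_true, if_false,
            hk, if_true, beq_self_eq_true]
          by_cases hz : a1 - a2 + 1 = 0
          · have hEq : a1 + 1 = a2 := by omega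
            rw [hz, solInner_zero, hEq]
            exact (ih rest hrest).2 a2 ans (String.ofList [c])
          · have := (ih rest hrest).1 (a1 + 1) a2 ans c (by omega)
            have harith : a1 + 1 - a2 = a1 - a2 + 1 := by ring
            rw [harith] at this
            exact this
        · have hk : (String.ofList [f] == String.ofList [c]) = false := by
            simp only [beq_eq_false_iff_ne, ne_eq, String.ext_iff, String.toList_ofList,
              List.cons.injEq, and_true]
            exact fun h => hc h.symm
          have hcf : (c == f) = false := by simp [hc]
          simp only [List.foldl_cons, solutionStep, hab, Bool.false_eq_true, if_false,
            hk, hcf]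
          by_cases hz : a1 - a2 + -1 = 0
          · have hEq : a1 = a2 + 1 := by omega
            rw [hz, solInner_zero, hEq]
            exact (ih rest hrest).2 (a2 + 1) ans (String.ofList [f])
          · have := (ih rest hrest).1 a1 (a2 + 1) ans f (by omega)
            have harith : a1 - (a2 + 1) = a1 - a2 + -1 := by ring
            rw [harith] at this
            exact this
    · intro a ans k
      cases l with
      | nil => simp [solOuter, solOuterF]
      | cons c rest =>
        have hrest : rest.length ≤ n := by
          simpa using Nat.lt_succ_iff.mp (Nat.lt_of_lt_of_le (by simp) hl)
        simp only [List.foldl_cons, solutionStep, beq_self_eq_true, if_true]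
        rw [solOuter_cons]
        have := (ih rest hrest).1 (a + 1) a (ans + 1) c (by omega)
        have harith : a + 1 - a = (1 : Int) := by ring
        rw [harith] at this
        rw [this]
        ring

-- ===== VERDICT (by name: the statement is the Claim_ definition above) =====
theorem solution_spec : Claim_equal_solution := by
  intro s _
  unfold Spec_solution solution solution_alt
  rw [solOuterF_eq s.toList.length s.toList le_rfl]
  exact (by simpa using (fold_lemma s.toList.length s.toList le_rfl).2 0 0 "")
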